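-- pv_equiv track=rewrite | github.com/shayneyh/Hitori-AI | hitori_csp.py | check_row_or_col
-- ===== SOURCE A (Python) =====
-- def check_row_or_col(tuple):
--     #check if all values are unique
--     new_list = []
--     for i in range(len(tuple)):
--         if tuple[i] not in new_list:#no repeated elements yet
--             new_list.append(tuple[i])
--         elif tuple[i] != 0:#repeat for non-zero value: not allowed
--             return False
--         elif tuple[i-1] == 0:#if previous element is also 0 (which would be adjacent to current one)
--             return False
--     return True
-- ===== SOURCE B (Python) =====
-- def check_row_or_col(tuple):
--     # two independent passes: no adjacent zeros, and non-zero values all distinct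
--     if any(tuple[i] == 0 and tuple[i - 1] == 0 for i in range(1, len(tuple))):
--         return False
--     nonzeros = [v for v in tuple if v != 0]
--     return len(nonzeros) == len(set(nonzeros))
-- ===== Notes on version B (the rewrite author's own statement) =====
-- stated objective: simpler
-- what changed: Replaces the single interleaved loop with its growing seen-list accumulator by two independent passes: an adjacency scan for consecutive zeros, then a length-vs-set comparison of the non-zero values.
import Mathlib
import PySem

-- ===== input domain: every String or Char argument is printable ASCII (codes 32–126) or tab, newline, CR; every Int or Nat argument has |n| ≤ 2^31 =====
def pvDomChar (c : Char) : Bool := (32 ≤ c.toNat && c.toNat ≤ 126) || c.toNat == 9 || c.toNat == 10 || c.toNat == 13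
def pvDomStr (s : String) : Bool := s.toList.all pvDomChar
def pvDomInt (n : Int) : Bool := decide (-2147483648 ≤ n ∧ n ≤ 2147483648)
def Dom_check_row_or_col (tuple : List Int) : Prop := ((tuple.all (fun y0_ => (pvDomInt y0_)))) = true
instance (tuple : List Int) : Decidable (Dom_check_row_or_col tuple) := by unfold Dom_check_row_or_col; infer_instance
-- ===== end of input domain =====

-- B replaces A's single interleaved seen-list loop by two independent passes (an adjacent-zero
-- scan, then a length-vs-set comparison of the non-zero values); objective: simpler.


-- ===== PORT A =====
-- the 'for i in range(len(tuple))' loop with its new_list accumulator and early returns.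
-- tuple[i-1] is ported with pyGetD (default never used: the index is always in range —
-- i-1 wraps to -1 only when i = 0, and there the list is nonempty since tuple[0] ∈ new_list)
def check_row_or_col_loop (t : List Int) (i : Nat) (new_list : List Int) : Bool :=
  if h : i < t.length then
    if ¬ new_list.contains t[i] then
      check_row_or_col_loop t (i + 1) (new_list ++ [t[i]])
    else if t[i] ≠ 0 then false
    else if PySem.List.pyGetD t ((i : Int) - 1) 0 = 0 then false
    else check_row_or_col_loop t (i + 1) new_list
  else true
termination_by t.length - i

def check_row_or_col (tuple : List Int) : Bool :=
  check_row_or_col_loop tuple 0 []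

-- ===== PORT B =====
def check_row_or_col_alt (tuple : List Int) : Bool :=
  if (PySem.List.pyRange 1 (tuple.length : Int) 1).any
      (fun i => PySem.List.pyGetD tuple i 0 == 0 && PySem.List.pyGetD tuple (i - 1) 0 == 0) then
    false
  else
    let nonzeros := tuple.filter (fun v => v ≠ 0)
    nonzeros.length == (PySem.Set.ofList nonzeros).length

-- ===== PRECONDITION & SPEC =====
def Spec_check_row_or_col (tuple : List Int) (out : Bool) : Prop := out = check_row_or_col_alt tuple
instance (tuple : List Int) (out : Bool) : Decidable (Spec_check_row_or_col tuple out) := by unfold Spec_check_row_or_col; infer_instance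

-- ===== CLAIM (what is proved, stated in full; the proofs are below) =====
def Claim_equal_check_row_or_col : Prop := ∀ (tuple : List Int), Dom_check_row_or_col tuple → Spec_check_row_or_col tuple (check_row_or_col tuple)

-- ===== LEMMAS AND PROOFS =====

-- index j is fine for A's loop: if t[j] repeats an earlier value, it is a zero with non-zero predecessor
def okAt (t : List Int) (j : Nat) : Prop :=
  ∀ (h : j < t.length), t[j] ∈ t.take j →
    t[j] = 0 ∧ PySem.List.pyGetD t ((j : Int) - 1) 0 ≠ 0

theorem mem_take_succ {t : List Int} {i : Nat} (h : i < t.length) (x : Int) :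
    x ∈ t.take (i + 1) ↔ x ∈ t.take i ∨ x = t[i] := by
  have e : List.take (i+1) t = List.take i t ++ [t[i]] := by
    rw [List.take_add_one, List.getElem?_eq_getElem h]
    rfl
  rw [e, List.mem_append, List.mem_singleton]

theorem shift_forall {t : List Int} {i : Nat} (hok : okAt t i) :
    (∀ j, i + 1 ≤ j → okAt t j) ↔ (∀ j, i ≤ j → okAt t j) := by
  constructor
  · intro hall j hj
    rcases Nat.eq_or_lt_of_le hj with rfl | hlt
    · exact hok
    · exact hall j hlt
  · intro hall j hj
    exact hall j (by omega)

theorem loop_spec (t : List Int) : ∀ (n i : Nat) (acc : List Int), t.length - i ≤ n →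
    (∀ x : Int, x ∈ acc ↔ x ∈ t.take i) →
    (check_row_or_col_loop t i acc = true ↔ ∀ j, i ≤ j → okAt t j) := by
  intro n
  induction n with
  | zero =>
    intro i acc hn hacc
    have hi : ¬ i < t.length := by omega
    rw [check_row_or_col_loop]
    simp only [hi, dif_neg, not_false_iff, true_iff]
    intro j hj h
    omega
  | succ n ih =>
    intro i acc hn hacc
    by_cases h : i < t.length
    · rw [check_row_or_col_loop]
      simp only [h, dif_pos]
      by_cases hmem : t[i] ∈ acc
      · simp only [List.contains_eq_mem, hmem, decide_true, not_true_eq_false, if_false]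
        by_cases hz : t[i] = 0
        · simp only [hz, ne_eq, not_true_eq_false, if_false]
          by_cases hp : PySem.List.pyGetD t ((i : Int) - 1) 0 = 0
          · simp only [hp, if_true]
            simp only [Bool.false_eq_true, false_iff]
            intro hall
            exact absurd hp (hall i (le_refl i) h ((hacc t[i]).mp hmem)).2
          · simp only [hp, if_false]
            have hok : okAt t i := fun _ _ => ⟨hz, hp⟩
            rw [ih (i+1) acc (by omega)
                (fun x => by rw [hacc x, mem_take_succ h x]
                             constructor
                             · exact Or.inl
                             · rintro (hx | rfl)
                               · exact hx
                               · exact (hacc t[i]).mp hmem)]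
            exact shift_forall hok
        · simp only [ne_eq, hz, not_false_iff, if_true]
          simp only [Bool.false_eq_true, false_iff]
          intro hall
          exact hz (hall i (le_refl i) h ((hacc t[i]).mp hmem)).1
      · simp only [List.contains_eq_mem, hmem, decide_false, Bool.false_eq_true, not_false_eq_true, if_true]
        have hok : okAt t i := by
          intro _ htake
          exact absurd ((hacc t[i]).mpr htake) hmem
        rw [ih (i+1) (acc ++ [t[i]]) (by omega)
            (fun x => by rw [List.mem_append, hacc x, mem_take_succ h x]; simp)]
        exact shift_forall hok
    · rw [check_row_or_col_loop]
      simp only [h, dif_neg, not_false_iff, true_iff]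
      intro j hj hlt
      omega

theorem A_iff (t : List Int) : check_row_or_col t = true ↔ ∀ j, okAt t j := by
  unfold check_row_or_col
  rw [loop_spec t t.length 0 [] (by omega) (by simp)]
  exact ⟨fun h j => h j (Nat.zero_le j), fun h j _ => h j⟩

-- set(xs) has as many elements as xs exactly when xs has no duplicates
theorem ofList_length_eq_iff (xs : List Int) :
    (PySem.Set.ofList xs).length = xs.length ↔ xs.Nodup := by
  induction xs using List.reverseRecOn with
  | nil => simp [PySem.Set.ofList]
  | append_singleton ys y ih =>
    have hof : PySem.Set.ofList (ys ++ [y]) = PySem.Set.add (PySem.Set.ofList ys) y := by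
      simp [PySem.Set.ofList_eq_foldl, List.foldl_append]
    rw [hof]
    by_cases hy : y ∈ PySem.Set.ofList ys
    · have hadd : PySem.Set.add (PySem.Set.ofList ys) y = PySem.Set.ofList ys := by
        simp [PySem.Set.add, List.contains_eq_mem, hy]
      rw [hadd]
      have hle := PySem.Set.length_ofList_le (xs := ys)
      have hyy : y ∈ ys := (PySem.Set.mem_ofList ys y).mp hy
      simp only [List.length_append, List.length_singleton]
      constructor
      · intro hlen; omega
      · intro hnd
        exfalso
        have hd := List.nodup_append.mp hnd
        exact hd.2.2 y hyy y (by simp) rfl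
    · have hadd : PySem.Set.add (PySem.Set.ofList ys) y = PySem.Set.ofList ys ++ [y] := by
        simp [PySem.Set.add, List.contains_eq_mem, hy]
      rw [hadd]
      have hyys : y ∉ ys := fun hm => hy ((PySem.Set.mem_ofList ys y).mpr hm)
      simp only [List.length_append, List.length_singleton, Nat.add_left_inj]
      rw [List.nodup_append]
      constructor
      · intro hlen
        refine ⟨ih.mp hlen, List.nodup_singleton y, ?_⟩
        intro a ha b hb
        simp only [List.mem_singleton] at hb
        subst hb
        intro he
        exact hyys (he ▸ ha)
      · intro ⟨h1, _, _⟩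
        exact ih.mpr h1

-- a value occurs twice in t exactly when some occurrence repeats an earlier one
theorem dup_iff (t : List Int) (x : Int) :
    (∃ (j : Nat) (h : j < t.length), t[j] = x ∧ x ∈ t.take j) ↔ 2 ≤ t.count x := by
  constructor
  · rintro ⟨j, hj, rfl, hmem⟩
    obtain ⟨k, hk, hke⟩ := List.getElem_of_mem hmem
    have hkj : k < j := Nat.lt_of_lt_of_le hk (List.length_take_le _ _)
    rw [List.getElem_take] at hke
    rw [← List.duplicate_iff_two_le_count, List.duplicate_iff_exists_distinct_get]
    exact ⟨⟨k, by omega⟩, ⟨j, hj⟩, by simpa using hkj, by simp [hke], by simp⟩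
  · intro hc
    obtain ⟨n, m, hnm, hxn, hxm⟩ :=
      List.duplicate_iff_exists_distinct_get.mp (List.duplicate_iff_two_le_count.mpr hc)
    refine ⟨m.1, m.2, by simpa using hxm.symm, ?_⟩
    have hgt : (t.take m.1)[n.1]'(by simp; omega) = t[n.1]'(by omega) := List.getElem_take
    have : x = (t.take m.1)[n.1]'(by simp; omega) := by
      rw [hgt]; simpa using hxn
    rw [this]
    exact List.getElem_mem _

-- duplicates among non-zero values, stated over indices of t
theorem nodup_filter_iff (t : List Int) :
    (t.filter (fun v => v ≠ 0)).Nodup ↔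
      ∀ (j : Nat) (h : j < t.length), t[j] ≠ 0 → t[j] ∉ t.take j := by
  rw [List.nodup_iff_count_le_one]
  constructor
  · intro hcnt j hj hnz hmem
    have h2 : 2 ≤ t.count t[j] := (dup_iff t t[j]).mp ⟨j, hj, rfl, hmem⟩
    have hle := hcnt t[j]
    rw [List.count_filter (by simp [hnz])] at hle
    omega
  · intro hall x
    by_cases hx : x = 0
    · have hzero : List.count x (t.filter (fun v => v ≠ 0)) = 0 := by
        rw [List.count_eq_zero]
        intro hmem
        exact absurd hx (by simpa using (List.mem_filter.mp hmem).2)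
      omega
    · rw [List.count_filter (by simp [hx])]
      by_contra h2
      obtain ⟨j, hj, hje, hmem⟩ := (dup_iff t x).mpr (by omega)
      subst hje
      exact hall j hj hx hmem

theorem B_iff (t : List Int) : check_row_or_col_alt t = true ↔
    (∀ (j : Nat), 1 ≤ j → ∀ (h : j < t.length), ¬ (t[j] = 0 ∧ t[j-1]'(by omega) = 0)) ∧
      (t.filter (fun v => v ≠ 0)).Nodup := by
  unfold check_row_or_col_alt
  rw [← ofList_length_eq_iff]
  by_cases hany : (PySem.List.pyRange 1 (t.length : Int) 1).any
      (fun i => PySem.List.pyGetD t i 0 == 0 && PySem.List.pyGetD t (i - 1) 0 == 0) = true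
  · simp only [hany, if_true]
    constructor
    · intro hf; exact absurd hf (by simp)
    · rintro ⟨hadj, _⟩
      rw [List.any_eq_true] at hany
      obtain ⟨i, hi, hcond⟩ := hany
      rw [PySem.List.mem_pyRange_one] at hi
      obtain ⟨hi1, hi2⟩ := hi
      set j : Nat := i.toNat with hj
      have hij : i = (j : Int) := by omega
      have hjlen : j < t.length := by omega
      have hj1 : 1 ≤ j := by omega
      simp only [Bool.and_eq_true, beq_iff_eq] at hcond
      rw [hij] at hcond
      have e1 : PySem.List.pyGetD t ((j : Int)) 0 = t[j] := by
        rw [PySem.List.pyGetD_natCast, List.getD_eq_getElem _ _ hjlen]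
      have e2 : ((j : Int) - 1) = ((j - 1 : Nat) : Int) := by omega
      have e3 : PySem.List.pyGetD t ((j : Int) - 1) 0 = t[j-1]'(by omega) := by
        rw [e2, PySem.List.pyGetD_natCast, List.getD_eq_getElem _ _ (by omega)]
      rw [e1, e3] at hcond
      exact absurd hcond (hadj j hj1 hjlen)
  · simp only [hany, Bool.false_eq_true, if_false]
    rw [beq_iff_eq, eq_comm]
    constructor
    · intro hlen
      refine ⟨?_, hlen⟩
      intro j hj1 hjlen ⟨hz1, hz2⟩
      apply hany
      rw [List.any_eq_true]
      refine ⟨(j : Int), ?_, ?_⟩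
      · rw [PySem.List.mem_pyRange_one]; omega
      · simp only [Bool.and_eq_true, beq_iff_eq]
        have e1 : PySem.List.pyGetD t ((j : Int)) 0 = t[j] := by
          rw [PySem.List.pyGetD_natCast, List.getD_eq_getElem _ _ hjlen]
        have e2 : ((j : Int) - 1) = ((j - 1 : Nat) : Int) := by omega
        have e3 : PySem.List.pyGetD t ((j : Int) - 1) 0 = t[j-1]'(by omega) := by
          rw [e2, PySem.List.pyGetD_natCast, List.getD_eq_getElem _ _ (by omega)]
        rw [e1, e3]
        exact ⟨hz1, hz2⟩
    · exact fun ⟨_, h2⟩ => h2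

theorem key (t : List Int) : (∀ j, okAt t j) ↔
    (∀ (j : Nat), 1 ≤ j → ∀ (h : j < t.length), ¬ (t[j] = 0 ∧ t[j-1]'(by omega) = 0)) ∧
      (∀ (j : Nat) (h : j < t.length), t[j] ≠ 0 → t[j] ∉ t.take j) := by
  constructor
  · intro hall
    constructor
    · intro j hj1 hjlen ⟨hz1, hz2⟩
      have hmem : t[j] ∈ t.take j := by
        have : (t.take j)[j-1]'(by simp; omega) = t[j-1]'(by omega) := List.getElem_take
        rw [hz1, ← hz2, ← this]
        exact List.getElem_mem _
      have := hall j hjlen hmem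
      have e2 : ((j : Int) - 1) = ((j - 1 : Nat) : Int) := by omega
      rw [e2, PySem.List.pyGetD_natCast, List.getD_eq_getElem _ _ (by omega)] at this
      exact this.2 hz2
    · intro j hjlen hnz hmem
      exact hnz (hall j hjlen hmem).1
  · intro ⟨hadj, hdup⟩ j hjlen hmem
    have hz : t[j] = 0 := by
      by_contra hnz
      exact hdup j hjlen hnz hmem
    refine ⟨hz, ?_⟩
    have hj1 : 1 ≤ j := by
      by_contra hj0
      have : j = 0 := by omega
      subst this
      simp at hmem
    have e2 : ((j : Int) - 1) = ((j - 1 : Nat) : Int) := by omega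
    rw [e2, PySem.List.pyGetD_natCast, List.getD_eq_getElem _ _ (by omega)]
    intro hz2
    exact hadj j hj1 hjlen ⟨hz, hz2⟩

-- ===== VERDICT (by name: the statement is the Claim_ definition above) =====
theorem check_row_or_col_spec : Claim_equal_check_row_or_col := by
  intro t _
  unfold Spec_check_row_or_col
  rw [Bool.eq_iff_iff, A_iff, B_iff, key, nodup_filter_iff]
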